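-- pv_equiv track=rewrite | github.com/jj-jinosko/DSA | playground.py | decodeBonus
-- ===== SOURCE A (Python) =====
-- def decodeBonus(hidden):
--     words = []
--     word = ""
--     for i in range(0, len(hidden) - 1, 2):
--         if hidden[i] == hidden[i+1]:
--             word = word + hidden[i]
--         else:
--             words.append(word)
--             word = ""
--     return words
-- ===== SOURCE B (Python) =====
-- def decodeBonus(hidden):
--     # Per-pair records: (chars match?, first char); then repeatedly split off
--     # the segment before the first mismatch record; the trailing segment is dropped.
--     pairs = [(hidden[i] == hidden[i + 1], hidden[i])
--              for i in range(0, len(hidden) - 1, 2)]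
--     words = []
--     while True:
--         k = next((j for j, (m, _) in enumerate(pairs) if not m), None)
--         if k is None:
--             return words
--         words.append("".join(c for _, c in pairs[:k]))
--         pairs = pairs[k + 1:]
-- ===== Notes on version B (the rewrite author's own statement) =====
-- stated objective: alternative
-- what changed: Replaces A's single accumulator pass with a pair-record precomputation followed by a split-at-first-mismatch loop that joins each slice into a word; the trailing segment drops out structurally instead of via never flushing the accumulator.
import Mathlib
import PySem

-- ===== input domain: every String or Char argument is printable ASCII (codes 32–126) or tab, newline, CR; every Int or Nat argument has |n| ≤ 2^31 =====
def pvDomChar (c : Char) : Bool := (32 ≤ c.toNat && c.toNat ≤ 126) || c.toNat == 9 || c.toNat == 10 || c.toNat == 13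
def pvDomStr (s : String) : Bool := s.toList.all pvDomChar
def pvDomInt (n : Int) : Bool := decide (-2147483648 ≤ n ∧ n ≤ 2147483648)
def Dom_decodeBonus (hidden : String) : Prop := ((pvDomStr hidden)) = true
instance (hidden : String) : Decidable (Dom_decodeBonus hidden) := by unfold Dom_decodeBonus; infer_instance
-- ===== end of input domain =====

-- B replaces A's single accumulator pass with pair records plus a split-at-first-mismatch
-- loop (objective: alternative decomposition, same results).

-- ===== PORT A =====
-- A: one pass over range(0, len-1, 2), growing a word on matching pairs and
-- flushing it on a mismatch; the pending word at the end is discarded.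
def decodeBonus (hidden : String) : List String :=
  ((PySem.List.pyRange 0 ((hidden.toList.length : Int) - 1) 2).foldl
    (fun (st : List String × List Char) i =>
      match PySem.List.pyGet? hidden.toList i, PySem.List.pyGet? hidden.toList (i + 1) with
      | some a, some b =>
          if a == b then (st.1, st.2 ++ [a])
          else (st.1 ++ [String.ofList st.2], ([] : List Char))
      | _, _ => st)   -- unreachable: every i in the range is a valid index
    ([], [])).1

-- ===== PORT B =====
-- the 'while True' loop of Source B: split off the segment before the first mismatch record
def pvSplitLoop (pairs : List (Bool × Char)) (words : List String) : List String :=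
  match hfst : pairs.findIdx? (fun p => !p.1) with
  | none => words
  | some k =>
      pvSplitLoop (pairs.drop (k + 1))
        (words ++ [String.ofList ((pairs.take k).map (·.2))])
termination_by pairs.length
decreasing_by
  have hne : pairs ≠ [] := by intro he; subst he; simp at hfst
  have : 0 < pairs.length := List.length_pos_iff.mpr hne
  simp [List.length_drop]; omega

def decodeBonus_alt (hidden : String) : List String :=
  pvSplitLoop
    ((PySem.List.pyRange 0 ((hidden.toList.length : Int) - 1) 2).map
      (fun i =>
        match PySem.List.pyGet? hidden.toList i with
        | none => (false, ' ')   -- unreachable: every i in the range is a valid index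
        | some a =>
          match PySem.List.pyGet? hidden.toList (i + 1) with
          | none => (false, ' ')
          | some b => (a == b, a)))
    []

-- ===== PRECONDITION & SPEC =====
def Spec_decodeBonus (hidden : String) (out : List String) : Prop := out = decodeBonus_alt hidden
instance (hidden : String) (out : List String) : Decidable (Spec_decodeBonus hidden out) := by unfold Spec_decodeBonus; infer_instance

-- ===== CLAIM (what is proved, stated in full; the proofs are below) =====
def Claim_equal_decodeBonus : Prop := ∀ (hidden : String), Dom_decodeBonus hidden → Spec_decodeBonus hidden (decodeBonus hidden)

-- ===== LEMMAS AND PROOFS =====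

-- reference recursion: the words A's loop emits given pending word w
def gwords (w : List Char) : List (Bool × Char) → List String
  | [] => []
  | (m, c) :: ps => if m then gwords (w ++ [c]) ps else String.ofList w :: gwords [] ps

-- A's fold over the pair records equals gwords
lemma foldl_pairs_eq_gwords (ps : List (Bool × Char)) :
    ∀ (ws : List String) (w : List Char),
      (ps.foldl
        (fun (st : List String × List Char) (p : Bool × Char) =>
          if p.1 then (st.1, st.2 ++ [p.2]) else (st.1 ++ [String.ofList st.2], ([] : List Char)))
        (ws, w)).1 = ws ++ gwords w ps := by
  induction ps with
  | nil => intro ws w; simp [gwords]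
  | cons p ps ih =>
      intro ws w
      obtain ⟨m, c⟩ := p
      cases m with
      | true => simp [gwords, ih]
      | false => simp [gwords, ih]

-- gwords splits at the first mismatch record
lemma gwords_split (ps : List (Bool × Char)) :
    ∀ (w : List Char),
      gwords w ps =
        match ps.findIdx? (fun p => !p.1) with
        | none => []
        | some k => String.ofList (w ++ (ps.take k).map (·.2)) :: gwords [] (ps.drop (k + 1)) := by
  induction ps with
  | nil => intro w; simp [gwords]
  | cons p ps ih =>
      intro w
      obtain ⟨m, c⟩ := p
      cases m with
      | true =>
          simp only [gwords, List.findIdx?_cons]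
          rw [ih (w ++ [c])]
          cases hf : ps.findIdx? (fun p => !p.1) with
          | none => simp
          | some k => simp [List.take_succ_cons, List.drop_succ_cons]
      | false =>
          simp [gwords, List.findIdx?_cons]

-- B's split loop equals gwords
lemma pvSplitLoop_eq_gwords (ps : List (Bool × Char)) (ws : List String) :
    pvSplitLoop ps ws = ws ++ gwords [] ps := by
  rw [pvSplitLoop, gwords_split]
  cases h : ps.findIdx? (fun p => !p.1) with
  | none => simp
  | some k =>
      simp only
      rw [pvSplitLoop_eq_gwords (ps.drop (k + 1))]
      simp
termination_by ps.length
decreasing_by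
  have hne : ps ≠ [] := by intro he; subst he; simp at h
  have : 0 < ps.length := List.length_pos_iff.mpr hne
  simp [List.length_drop]; omega

-- every index the range produces is valid for cs (and so is its successor)
lemma pyGet?_some_of_mem_range (cs : List Char) (i : Int)
    (hi : i ∈ PySem.List.pyRange 0 ((cs.length : Int) - 1) 2) :
    ∃ a b, PySem.List.pyGet? cs i = some a ∧ PySem.List.pyGet? cs (i + 1) = some b := by
  obtain ⟨h0, h1, -⟩ := (PySem.List.mem_pyRange_iff_of_pos (by norm_num) i).1 hi
  exact ⟨_, _, PySem.List.pyGet?_eq_some_getElem cs h0 (by omega),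
    PySem.List.pyGet?_eq_some_getElem cs (by omega) (by omega)⟩

-- ===== VERDICT (by name: the statement is the Claim_ definition above) =====
theorem decodeBonus_spec : Claim_equal_decodeBonus := by
  intro hidden _
  unfold Spec_decodeBonus decodeBonus decodeBonus_alt
  rw [pvSplitLoop_eq_gwords]
  rw [← foldl_pairs_eq_gwords]
  rw [List.foldl_map]
  congr 1
  apply PySem.List.foldl_congr_mem
  intro st i hi
  obtain ⟨a, b, ha, hb⟩ := pyGet?_some_of_mem_range hidden.toList i hi
  simp only [ha, hb]
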